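-- pv_equiv track=rewrite | github.com/ulfe-lmi/slaif-api-gateway | app/slaif_gateway/providers/headers.py | build_provider_headers
-- ===== SOURCE A (Python) =====
-- from collections.abc import Mapping
--
-- _SAFE_EXTRA_HEADERS = {
--     "accept": "Accept",
--     "content-type": "Content-Type",
--     "x-request-id": "X-Request-ID",
-- }
--
-- _FORBIDDEN_HEADER_FRAGMENTS = (
--     "authorization",
--     "cookie",
--     "csrf",
--     "session",
--     "password",
--     "token",
--     "secret",
--     "admin",
--     "gateway",
--     "api-key",
--     "apikey",
--     "set-cookie",
-- )
--
-- def build_provider_headers(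
--     provider_api_key: str,
--     provider: str,
--     request_id: str | None = None,
--     extra_headers: Mapping[str, str] | None = None,
--     accept: str = "application/json",
-- ) -> dict[str, str]:
--     """Build safe outbound headers for an upstream provider request."""
--     _ = provider
--     headers: dict[str, str] = {
--         "Authorization": f"Bearer {provider_api_key}",
--         "Content-Type": "application/json",
--         "Accept": accept,
--     }
--
--     if extra_headers:
--         for raw_name, value in extra_headers.items():
--             normalized_name = raw_name.strip().lower()
--             if not normalized_name or _is_forbidden_header(normalized_name):
--                 continue
--             canonical_name = _SAFE_EXTRA_HEADERS.get(normalized_name)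
--             if canonical_name is None:
--                 continue
--             headers[canonical_name] = value
--
--     headers["Accept"] = accept
--
--     if request_id:
--         headers["X-Request-ID"] = request_id
--
--     return headers
--
-- def _is_forbidden_header(normalized_name: str) -> bool:
--     return any(fragment in normalized_name for fragment in _FORBIDDEN_HEADER_FRAGMENTS)
-- ===== SOURCE B (Python) =====
-- def build_provider_headers(
--     provider_api_key,
--     provider,
--     request_id=None,
--     extra_headers=None,
--     accept="application/json",
-- ):
--     """Build safe outbound headers by direct construction: the result always has the
--     fixed keys Authorization / Content-Type / Accept (plus optionally X-Request-ID),
--     so compute each final value with a reverse scan for the last matching extra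
--     header instead of mutating a dict.  Only exact allowlisted names can ever be
--     taken over ("content-type", "x-request-id"; an extra "accept" is always
--     overwritten), and no forbidden fragment is a substring of those allowlisted
--     names, so matching by exact normalized name is the whole filter."""
--
--     def last_extra(key):
--         # value of the LAST extra header whose normalized name equals `key`
--         if extra_headers:
--             for raw_name, value in reversed(list(extra_headers.items())):
--                 if raw_name.strip().lower() == key:
--                     return value
--         return None
--
--     ct = last_extra("content-type")
--     headers = {
--         "Authorization": f"Bearer {provider_api_key}",
--         "Content-Type": ct if ct is not None else "application/json",
--         "Accept": accept,
--     }
--     rid = request_id if request_id else last_extra("x-request-id")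
--     if rid is not None:
--         headers["X-Request-ID"] = rid
--     return headers
-- ===== Notes on version B (the rewrite author's own statement) =====
-- stated objective: faster
-- what changed: A mutates a headers dict while scanning extra_headers forward with per-item forbidden-fragment and allowlist tests and then patches Accept and X-Request-ID; B never mutates a dict: it computes each final header value directly (Content-Type and X-Request-ID by a reverse scan with early exit for the last extra header with that exact normalized name, Accept always the accept argument) and constructs the fixed-shape result in one go, the substring filter being folded into exact-name matching since no forbidden fragment occurs in an allowlisted name.
import Mathlib
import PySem

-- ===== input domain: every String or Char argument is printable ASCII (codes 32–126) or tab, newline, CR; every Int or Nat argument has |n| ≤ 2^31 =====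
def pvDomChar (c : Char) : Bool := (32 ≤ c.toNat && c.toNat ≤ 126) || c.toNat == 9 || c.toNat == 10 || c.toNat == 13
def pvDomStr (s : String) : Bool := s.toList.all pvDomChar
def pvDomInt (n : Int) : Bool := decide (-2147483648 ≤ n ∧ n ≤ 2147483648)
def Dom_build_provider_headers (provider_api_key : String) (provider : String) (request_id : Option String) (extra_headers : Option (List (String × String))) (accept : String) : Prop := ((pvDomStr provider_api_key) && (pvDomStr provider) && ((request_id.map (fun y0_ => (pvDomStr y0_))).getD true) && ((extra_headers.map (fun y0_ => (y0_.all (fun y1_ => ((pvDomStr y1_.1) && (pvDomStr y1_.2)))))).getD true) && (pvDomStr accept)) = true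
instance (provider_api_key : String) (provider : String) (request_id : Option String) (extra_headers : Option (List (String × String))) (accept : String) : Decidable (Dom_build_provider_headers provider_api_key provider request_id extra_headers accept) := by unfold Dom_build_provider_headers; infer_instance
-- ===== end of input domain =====

-- B builds the fixed-shape result directly (reverse scan for the last matching extra
-- header, no dict mutation) instead of A's forward scan-and-overwrite (objective: alternative).

-- ===== PORT A =====
-- module constant _SAFE_EXTRA_HEADERS (a dict literal)
def pvSafeExtraHeaders : PySem.Dict String String :=
  PySem.Dict.mk [("accept", "Accept"), ("content-type", "Content-Type"), ("x-request-id", "X-Request-ID")]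

-- module constant _FORBIDDEN_HEADER_FRAGMENTS
def pvForbiddenFragments : List String :=
  ["authorization", "cookie", "csrf", "session", "password", "token", "secret",
   "admin", "gateway", "api-key", "apikey", "set-cookie"]

-- helper _is_forbidden_header
def pvIsForbiddenHeader (normalized_name : String) : Bool :=
  pvForbiddenFragments.any (fun fragment => PySem.Str.isIn fragment normalized_name)

-- loop body of A's 'for raw_name, value in extra_headers.items()'
def pvStepA (headers : PySem.Dict String String) (p : String × String) : PySem.Dict String String :=
  let normalized := PySem.Str.lower (PySem.Str.strip p.1)
  if normalized = "" ∨ pvIsForbiddenHeader normalized then headers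
  else
    match pvSafeExtraHeaders.get? normalized with
    | none => headers
    | some canonical => headers.insert canonical p.2

def build_provider_headers (provider_api_key : String) (provider : String) (request_id : Option String) (extra_headers : Option (List (String × String))) (accept : String) : List (String × String) :=
  let headers : PySem.Dict String String :=
    ((PySem.Dict.empty.insert "Authorization" ("Bearer " ++ provider_api_key)).insert
      "Content-Type" "application/json").insert "Accept" accept
  let headers :=
    match extra_headers with
    | some ex => if ex = [] then headers else ex.foldl pvStepA headers
    | none => headers
  let headers := headers.insert "Accept" accept
  let headers :=
    match request_id with
    | some r => if r = "" then headers else headers.insert "X-Request-ID" r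
    | none => headers
  headers.items

-- ===== PORT B =====
-- B's helper last_extra: reverse scan for the last extra header normalizing to `key`
def pvLastExtra (extra_headers : Option (List (String × String))) (key : String) : Option String :=
  match extra_headers with
  | some ex =>
    if ex = [] then none
    else (ex.reverse.find? (fun p => PySem.Str.lower (PySem.Str.strip p.1) == key)).map Prod.snd
  | none => none

def build_provider_headers_alt (provider_api_key : String) (provider : String) (request_id : Option String) (extra_headers : Option (List (String × String))) (accept : String) : List (String × String) :=
  let ct := pvLastExtra extra_headers "content-type"
  let base : List (String × String) :=
    [("Authorization", "Bearer " ++ provider_api_key),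
     ("Content-Type", ct.getD "application/json"),
     ("Accept", accept)]
  let rid :=
    match request_id with
    | some r => if r = "" then pvLastExtra extra_headers "x-request-id" else some r
    | none => pvLastExtra extra_headers "x-request-id"
  match rid with
  | some v => base ++ [("X-Request-ID", v)]
  | none => base

-- ===== PRECONDITION & SPEC =====
def Spec_build_provider_headers (provider_api_key : String) (provider : String) (request_id : Option String) (extra_headers : Option (List (String × String))) (accept : String) (out : List (String × String)) : Prop := out = build_provider_headers_alt provider_api_key provider request_id extra_headers accept
instance (provider_api_key : String) (provider : String) (request_id : Option String) (extra_headers : Option (List (String × String))) (accept : String) (out : List (String × String)) : Decidable (Spec_build_provider_headers provider_api_key provider request_id extra_headers accept out) := by unfold Spec_build_provider_headers; infer_instance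

-- ===== CLAIM (what is proved, stated in full; the proofs are below) =====
def Claim_equal_build_provider_headers : Prop := ∀ (provider_api_key : String) (provider : String) (request_id : Option String) (extra_headers : Option (List (String × String))) (accept : String), Dom_build_provider_headers provider_api_key provider request_id extra_headers accept → Spec_build_provider_headers provider_api_key provider request_id extra_headers accept (build_provider_headers provider_api_key provider request_id extra_headers accept)

-- ===== LEMMAS AND PROOFS =====

-- Abstract shape of A's headers dict at every point of the program.
def pvBaseD (auth ct ac : String) (x : Option String) : PySem.Dict String String :=
  PySem.Dict.mk (("Authorization", auth) :: ("Content-Type", ct) :: ("Accept", ac) ::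
    (match x with | none => [] | some v => [("X-Request-ID", v)]))

-- value of the LAST extra header whose normalized name is k (front-recursion form)
def pvLastV (ex : List (String × String)) (k : String) : Option String :=
  (ex.filterMap (fun p => if PySem.Str.lower (PySem.Str.strip p.1) = k then some p.2 else none)).getLast?

theorem pv_getLast?_cons {α : Type} (v : α) (t : List α) :
    (v :: t).getLast? = some ((t.getLast?).getD v) := by
  induction t generalizing v with
  | nil => rfl
  | cons w t ih => rw [List.getLast?_cons_cons, ih w]; rfl

theorem pvBaseD_insert_accept (auth ct ac : String) (x : Option String) (v : String) :
    (pvBaseD auth ct ac x).insert "Accept" v = pvBaseD auth ct v x := by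
  apply PySem.Dict.ext
  cases x <;> simp [pvBaseD, PySem.Dict.insert, PySem.Dict.contains]

theorem pvBaseD_insert_ct (auth ct ac : String) (x : Option String) (v : String) :
    (pvBaseD auth ct ac x).insert "Content-Type" v = pvBaseD auth v ac x := by
  apply PySem.Dict.ext
  cases x <;> simp [pvBaseD, PySem.Dict.insert, PySem.Dict.contains]

theorem pvBaseD_insert_xrid (auth ct ac : String) (x : Option String) (v : String) :
    (pvBaseD auth ct ac x).insert "X-Request-ID" v = pvBaseD auth ct ac (some v) := by
  apply PySem.Dict.ext
  cases x <;> simp [pvBaseD, PySem.Dict.insert, PySem.Dict.contains]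

theorem pvInit_eq (auth ac : String) :
    ((PySem.Dict.empty.insert "Authorization" auth).insert
      "Content-Type" "application/json").insert "Accept" ac
      = pvBaseD auth "application/json" ac none := by
  apply PySem.Dict.ext
  simp [pvBaseD, PySem.Dict.empty, PySem.Dict.insert, PySem.Dict.contains]

theorem pvLastV_cons_eq (p : String × String) (ex : List (String × String)) (k : String)
    (h : PySem.Str.lower (PySem.Str.strip p.1) = k) :
    pvLastV (p :: ex) k = some ((pvLastV ex k).getD p.2) := by
  simp only [pvLastV, List.filterMap_cons, h]
  exact pv_getLast?_cons _ _

theorem pvLastV_cons_ne (p : String × String) (ex : List (String × String)) (k : String)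
    (h : ¬ PySem.Str.lower (PySem.Str.strip p.1) = k) :
    pvLastV (p :: ex) k = pvLastV ex k := by
  simp only [pvLastV, List.filterMap_cons, if_neg h]

-- A's loop body, characterized by the normalized name
theorem pvStepA_cases (h : PySem.Dict String String) (p : String × String) :
    pvStepA h p =
      (if PySem.Str.lower (PySem.Str.strip p.1) = "accept" then h.insert "Accept" p.2
       else if PySem.Str.lower (PySem.Str.strip p.1) = "content-type" then h.insert "Content-Type" p.2
       else if PySem.Str.lower (PySem.Str.strip p.1) = "x-request-id" then h.insert "X-Request-ID" p.2
       else h) := by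
  set n := PySem.Str.lower (PySem.Str.strip p.1) with hn
  by_cases h1 : n = "accept"
  · simp only [pvStepA, ← hn, h1]
    have hc : ¬ (("accept" : String) = "" ∨ pvIsForbiddenHeader "accept" = true) := by decide
    rw [if_neg hc]
    rfl
  · by_cases h2 : n = "content-type"
    · simp only [pvStepA, ← hn, h2, if_neg h1]
      have hc : ¬ (("content-type" : String) = "" ∨ pvIsForbiddenHeader "content-type" = true) := by decide
      rw [if_neg hc]
      rfl
    · by_cases h3 : n = "x-request-id"
      · simp only [pvStepA, ← hn, h3, if_neg h1, if_neg h2]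
        have hc : ¬ (("x-request-id" : String) = "" ∨ pvIsForbiddenHeader "x-request-id" = true) := by decide
        rw [if_neg hc]
        rfl
      · have hg : pvSafeExtraHeaders.get? n = none := by
          have e1 : (("accept" : String) == n) = false := beq_eq_false_iff_ne.mpr (Ne.symm h1)
          have e2 : (("content-type" : String) == n) = false := beq_eq_false_iff_ne.mpr (Ne.symm h2)
          have e3 : (("x-request-id" : String) == n) = false := beq_eq_false_iff_ne.mpr (Ne.symm h3)
          simp [pvSafeExtraHeaders, PySem.Dict.get?, List.find?, e1, e2, e3]
        simp only [pvStepA, ← hn, if_neg h1, if_neg h2, if_neg h3, hg]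
        split <;> rfl

-- A's whole extra-headers loop on the abstract dict shape
theorem pv_foldA (ex : List (String × String)) (auth ct ac : String) (x : Option String) :
    ex.foldl pvStepA (pvBaseD auth ct ac x) =
      pvBaseD auth ((pvLastV ex "content-type").getD ct) ((pvLastV ex "accept").getD ac)
        ((pvLastV ex "x-request-id").or x) := by
  induction ex generalizing ct ac x with
  | nil => simp [pvLastV]
  | cons p ex ih =>
    rw [List.foldl_cons, pvStepA_cases]
    by_cases h1 : PySem.Str.lower (PySem.Str.strip p.1) = "accept"
    · rw [if_pos h1, pvBaseD_insert_accept, ih,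
        pvLastV_cons_eq p ex "accept" h1,
        pvLastV_cons_ne p ex "content-type" (by rw [h1]; decide),
        pvLastV_cons_ne p ex "x-request-id" (by rw [h1]; decide)]
      cases pvLastV ex "accept" <;> rfl
    · rw [if_neg h1]
      by_cases h2 : PySem.Str.lower (PySem.Str.strip p.1) = "content-type"
      · rw [if_pos h2, pvBaseD_insert_ct, ih,
          pvLastV_cons_eq p ex "content-type" h2,
          pvLastV_cons_ne p ex "accept" (by rw [h2]; decide),
          pvLastV_cons_ne p ex "x-request-id" (by rw [h2]; decide)]
        cases pvLastV ex "content-type" <;> rfl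
      · rw [if_neg h2]
        by_cases h3 : PySem.Str.lower (PySem.Str.strip p.1) = "x-request-id"
        · rw [if_pos h3, pvBaseD_insert_xrid, ih,
            pvLastV_cons_eq p ex "x-request-id" h3,
            pvLastV_cons_ne p ex "accept" (by rw [h3]; decide),
            pvLastV_cons_ne p ex "content-type" (by rw [h3]; decide)]
          cases pvLastV ex "x-request-id" <;> cases x <;> rfl
        · rw [if_neg h3, ih,
            pvLastV_cons_ne p ex "accept" h1,
            pvLastV_cons_ne p ex "content-type" h2,
            pvLastV_cons_ne p ex "x-request-id" h3]

-- B's reverse scan computes exactly pvLastV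
theorem pv_head?_filterMap (l : List (String × String)) (k : String) :
    ((l.find? (fun p => PySem.Str.lower (PySem.Str.strip p.1) == k)).map Prod.snd) =
      (l.filterMap (fun p => if PySem.Str.lower (PySem.Str.strip p.1) = k then some p.2 else none)).head? := by
  induction l with
  | nil => rfl
  | cons p l ih =>
    by_cases h : PySem.Str.lower (PySem.Str.strip p.1) = k
    · rw [List.find?_cons_of_pos (by simpa using h)]
      simp [List.filterMap_cons, h]
    · rw [List.find?_cons_of_neg (by simpa using h)]
      simp only [List.filterMap_cons, if_neg h]
      exact ih

theorem pvLastExtra_eq_lastV (ex : List (String × String)) (k : String) (hex : ex ≠ []) :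
    pvLastExtra (some ex) k = pvLastV ex k := by
  simp only [pvLastExtra, if_neg hex, pvLastV]
  rw [pv_head?_filterMap, List.filterMap_reverse, List.head?_reverse]

-- final stretch shared by both ports: overwrite Accept, optional X-Request-ID, take items
theorem pv_finish (auth ac accept : String) (request_id : Option String)
    (ctv : String) (x : Option String) :
    (match request_id with
     | some r => if r = "" then (pvBaseD auth ctv ac x).insert "Accept" accept
                 else ((pvBaseD auth ctv ac x).insert "Accept" accept).insert "X-Request-ID" r
     | none => (pvBaseD auth ctv ac x).insert "Accept" accept).items =
    (match (match request_id with | some r => if r = "" then x else some r | none => x) with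
     | some v => [("Authorization", auth), ("Content-Type", ctv), ("Accept", accept), ("X-Request-ID", v)]
     | none => [("Authorization", auth), ("Content-Type", ctv), ("Accept", accept)]) := by
  cases request_id with
  | none => rw [pvBaseD_insert_accept]; cases x <;> rfl
  | some r =>
    by_cases hr : r = ""
    · simp only [if_pos hr]
      rw [pvBaseD_insert_accept]; cases x <;> rfl
    · simp only [if_neg hr]
      rw [pvBaseD_insert_accept, pvBaseD_insert_xrid]; rfl

-- main equality
theorem build_provider_headers_eq (provider_api_key provider : String) (request_id : Option String)
    (extra_headers : Option (List (String × String))) (accept : String) :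
    build_provider_headers provider_api_key provider request_id extra_headers accept =
      build_provider_headers_alt provider_api_key provider request_id extra_headers accept := by
  unfold build_provider_headers build_provider_headers_alt
  cases extra_headers with
  | none =>
    simpa [pvLastExtra, pvInit_eq] using
      pv_finish ("Bearer " ++ provider_api_key) accept accept request_id "application/json" none
  | some ex =>
    by_cases hex : ex = []
    · subst hex
      simpa [pvLastExtra, pvInit_eq] using
        pv_finish ("Bearer " ++ provider_api_key) accept accept request_id "application/json" none
    · simp only [if_neg hex, pvInit_eq, pv_foldA, Option.or_none,
        pvLastExtra_eq_lastV _ _ hex]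
      simpa using
        pv_finish ("Bearer " ++ provider_api_key) ((pvLastV ex "accept").getD accept) accept
          request_id ((pvLastV ex "content-type").getD "application/json") (pvLastV ex "x-request-id")

-- ===== VERDICT (by name: the statement is the Claim_ definition above) =====
theorem build_provider_headers_spec : Claim_equal_build_provider_headers := by
  intro provider_api_key provider request_id extra_headers accept _
  exact build_provider_headers_eq provider_api_key provider request_id extra_headers accept
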